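-- pv_equiv track=rewrite | github.com/alvinvaja/spell-correction | src/main.py | isEntitasWord
-- ===== SOURCE A (Python) =====
-- def isEntitasWord(word):
--     if len(word) <= 0:
--         return True
--     for i in range(0, len(word)):
--         if (word[i] >= 'a' and word[i] <= 'z') or word[i] == '-':
--             cnt = 1
--         else:
--             return True
--
--     return False
-- ===== SOURCE B (Python) =====
-- import re
--
-- _ENTITAS_RE = re.compile(r'[a-z-]+')
--
-- def isEntitasWord(word):
--     # True iff word is NOT a non-empty run of lowercase letters/hyphens
--     return _ENTITAS_RE.fullmatch(word) is None
-- ===== Notes on version B (the rewrite author's own statement) =====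
-- stated objective: idiomatic
-- what changed: Replaced the indexed character-by-character loop with early return by a single compiled-regex fullmatch against [a-z-]+, whose failure (including the empty string) is the True case.
import Mathlib
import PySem

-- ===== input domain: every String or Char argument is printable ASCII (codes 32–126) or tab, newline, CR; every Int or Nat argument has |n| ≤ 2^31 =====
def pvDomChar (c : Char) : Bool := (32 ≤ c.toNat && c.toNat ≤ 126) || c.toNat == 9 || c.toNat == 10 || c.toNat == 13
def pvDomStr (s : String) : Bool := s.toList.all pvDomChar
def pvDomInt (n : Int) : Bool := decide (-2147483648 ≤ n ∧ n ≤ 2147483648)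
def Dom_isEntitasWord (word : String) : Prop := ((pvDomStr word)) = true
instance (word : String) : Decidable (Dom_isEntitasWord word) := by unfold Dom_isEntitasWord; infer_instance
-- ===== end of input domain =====

-- B validates the whole string with one regex-style fullmatch ([a-z-]+, i.e. non-empty and every char in the class) instead of an indexed loop with early return; objective: idiomatic.


-- ===== PORT A =====
-- the for-loop with early return: scan chars, return True on the first out-of-class char, False if none
def isEntitasWordGo : List Char → Bool
  | [] => false
  | c :: rest =>
    if (('a' ≤ c ∧ c ≤ 'z') ∨ c = '-') then isEntitasWordGo rest else true

def isEntitasWord (word : String) : Bool :=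
  if word.toList.length ≤ 0 then true
  else isEntitasWordGo word.toList

-- ===== PORT B =====
-- fullmatch of the regex [a-z-]+ : non-empty and every char in the class; B returns its negation
def isEntitasWord_alt (word : String) : Bool :=
  !(decide (word.toList ≠ []) && word.toList.all (fun c => ('a' ≤ c && c ≤ 'z') || c == '-'))

-- ===== PRECONDITION & SPEC =====
def Spec_isEntitasWord (word : String) (out : Bool) : Prop := out = isEntitasWord_alt word
instance (word : String) (out : Bool) : Decidable (Spec_isEntitasWord word out) := by unfold Spec_isEntitasWord; infer_instance

-- ===== CLAIM (what is proved, stated in full; the proofs are below) =====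
def Claim_equal_isEntitasWord : Prop := ∀ (word : String), Dom_isEntitasWord word → Spec_isEntitasWord word (isEntitasWord word)

-- ===== LEMMAS AND PROOFS =====
theorem isEntitasWordGo_eq (l : List Char) :
    isEntitasWordGo l = !(l.all (fun c => ('a' ≤ c && c ≤ 'z') || c == '-')) := by
  induction l with
  | nil => simp [isEntitasWordGo]
  | cons c rest ih =>
    simp only [isEntitasWordGo, List.all_cons]
    by_cases h : (('a' ≤ c ∧ c ≤ 'z') ∨ c = '-')
    · have hb : (('a' ≤ c && c ≤ 'z') || c == '-') = true := by
        rcases h with ⟨h1, h2⟩ | h3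
        · simp [h1, h2]
        · simp [h3]
      simp [h, hb, ih]
    · have hb : (('a' ≤ c && c ≤ 'z') || c == '-') = false := by
        rcases Decidable.em ('a' ≤ c ∧ c ≤ 'z') with h1 | h1
        · exact absurd (Or.inl h1) h
        · rcases Decidable.em (c = '-') with h2 | h2
          · exact absurd (Or.inr h2) h
          · simp only [Bool.or_eq_false_iff, Bool.and_eq_false_iff]
            refine ⟨?_, by simpa using h2⟩
            rcases Decidable.em ('a' ≤ c) with h3 | h3
            · right; simpa using fun h4 => h1 ⟨h3, h4⟩
            · left; simpa using h3
      simp [h, hb]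

-- ===== VERDICT (by name: the statement is the Claim_ definition above) =====
theorem isEntitasWord_spec : Claim_equal_isEntitasWord := by
  intro word _
  unfold Spec_isEntitasWord isEntitasWord isEntitasWord_alt
  cases h : word.toList with
  | nil => simp
  | cons c rest => simp [isEntitasWordGo_eq (c :: rest)]
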